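-- pv_equiv track=rewrite | github.com/EIS-FEIL/eis | eis/lib/feedbackreport.py | is_empty_html
-- ===== SOURCE A (Python) =====
-- def is_empty_html(data):
--     "Kas tagasiside on tühi (kui on ainult HTML märgendid ja teksti pole, siis on ka tühi)"
--     if data:
--         tag = None
--         for ch in data:
--             if tag:
--                 if ch == '>':
--                     if tag.lower().startswith('<img '):
--                         # pilti sisaldav tagasiside ei ole tyhi (ES-3329)
--                         return False
--                     tag = None
--                 else:
--                     tag += ch
--             elif ch == '<':
--                 tag = ch
--             elif ch.strip():
--                 # sisaldab teksti, ei ole tyhi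
--                 return False
--     return True
-- ===== SOURCE B (Python) =====
-- import re
--
-- def is_empty_html(data):
--     "Kas tagasiside on tühi (kui on ainult HTML märgendid ja teksti pole, siis on ka tühi)"
--     if not data:
--         return True
--     for m in re.finditer(r'<[^>]*>', data):
--         if m.group().lower().startswith('<img '):
--             return False
--     remainder = re.sub(r'<[^>]*$', '', re.sub(r'<[^>]*>', '', data))
--     return not remainder.strip()
-- ===== Notes on version B (the rewrite author's own statement) =====
-- stated objective: alternative
-- what changed: Replaced the char-by-char state machine with early returns by a regex-based decomposition: collect all closed-tag matches and reject any img tag, then delete the tags and the unclosed trailing tag and test whether the leftover text strips to empty.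
import Mathlib
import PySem

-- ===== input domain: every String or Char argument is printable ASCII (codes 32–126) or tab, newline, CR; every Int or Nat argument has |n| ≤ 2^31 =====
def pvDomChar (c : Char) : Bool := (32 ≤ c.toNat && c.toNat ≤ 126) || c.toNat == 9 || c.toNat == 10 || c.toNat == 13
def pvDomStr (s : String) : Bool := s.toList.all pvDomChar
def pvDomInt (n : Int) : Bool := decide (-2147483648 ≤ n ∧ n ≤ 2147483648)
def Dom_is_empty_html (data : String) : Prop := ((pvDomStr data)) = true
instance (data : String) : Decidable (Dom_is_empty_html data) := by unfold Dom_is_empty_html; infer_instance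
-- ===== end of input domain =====

-- B replaces A's char-by-char state machine with a regex-style decomposition (collect tag matches,
-- strip them out, test the leftover text); same return value, objective: alternative decomposition.

-- ===== PORT A =====
-- tag.lower().startswith('<img ')
def pvIsImgTagA (tag : List Char) : Bool :=
  PySem.Chars.startswith (PySem.Chars.lower tag) "<img ".toList

-- the for-loop over the characters, state = tag (None or the accumulated '<...' text)
def pvLoopA : List Char → Option (List Char) → Bool
  | [], _ => true
  | ch :: rest, some tag =>
      if ch = '>' then
        if pvIsImgTagA tag then false else pvLoopA rest none
      else pvLoopA rest (some (tag ++ [ch]))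
  | ch :: rest, none =>
      if ch = '<' then pvLoopA rest (some ['<'])
      else if PySem.Chars.strip [ch] ≠ [] then false
      else pvLoopA rest none

def is_empty_html (data : String) : Bool :=
  if data.toList = [] then true else pvLoopA data.toList none

-- ===== PORT B =====
-- m.group().lower().startswith('<img ')
def pvIsImgMatch (g : List Char) : Bool :=
  PySem.Chars.startswith (PySem.Chars.lower g) "<img ".toList

-- one regex match attempt for '[^>]*>' (after a '<'): chars up to the first '>', and the rest
def pvScanTag : List Char → Option (List Char × List Char)
  | [] => none
  | c :: rest =>
      if c = '>' then some ([], rest)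
      else match pvScanTag rest with
        | none => none
        | some (t, r) => some (c :: t, r)

-- termination helper for pvSplit
theorem pvScanTag_length : ∀ (xs t : List Char) (r : List Char),
    pvScanTag xs = some (t, r) → r.length < xs.length := by
  intro xs
  induction xs with
  | nil => intro t r h; simp [pvScanTag] at h
  | cons c rest ih =>
    intro t r h
    simp only [pvScanTag] at h
    split at h
    · simp at h
      obtain ⟨-, rfl⟩ := h
      simp
    · cases hs : pvScanTag rest with
      | none => rw [hs] at h; simp at h
      
      | some p =>
        rw [hs] at h
        simp at h
        obtain ⟨-, rfl⟩ := h
        have := ih p.1 p.2 (by rw [hs])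
        simp
        omega

-- re.finditer(r'<[^>]*>', data): the list of full matches, and the text outside the matches
-- (the second component is what re.sub(r'<[^>]*>', '', data) leaves)
def pvSplit : List Char → List (List Char) × List Char
  | [] => ([], [])
  | c :: rest =>
      if c = '<' then
        match h : pvScanTag rest with
        | none => ([], c :: rest)
        | some (t, r) =>
            let p := pvSplit r
            (('<' :: t ++ ['>']) :: p.1, p.2)
      else
        let p := pvSplit rest
        (p.1, c :: p.2)
  termination_by xs => xs.length
  decreasing_by
  · exact Nat.lt_succ_of_lt (pvScanTag_length rest t r h)
  · simp

-- re.sub(r'<[^>]*$', '', s): drop everything from the leftmost '<' not followed by any '>'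
def pvDropUnclosed : List Char → List Char
  | [] => []
  | c :: rest =>
      if c = '<' && !rest.contains '>' then [] else c :: pvDropUnclosed rest

def is_empty_html_alt (data : String) : Bool :=
  if data.toList = [] then true
  else
    let p := pvSplit data.toList
    if p.1.any pvIsImgMatch then false
    else (PySem.Chars.strip (pvDropUnclosed p.2)).isEmpty

-- ===== PRECONDITION & SPEC =====
def Spec_is_empty_html (data : String) (out : Bool) : Prop := out = is_empty_html_alt data
instance (data : String) (out : Bool) : Decidable (Spec_is_empty_html data out) := by unfold Spec_is_empty_html; infer_instance

-- ===== CLAIM (what is proved, stated in full; the proofs are below) =====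
def Claim_equal_is_empty_html : Prop := ∀ (data : String), Dom_is_empty_html data → Spec_is_empty_html data (is_empty_html data)

-- ===== LEMMAS AND PROOFS =====

theorem pvSplit_lt_none (rest : List Char) (hs : pvScanTag rest = none) :
    pvSplit ('<' :: rest) = ([], '<' :: rest) := by
  rw [pvSplit]
  simp
  split <;> simp_all

theorem pvSplit_lt_some (rest t r : List Char) (hs : pvScanTag rest = some (t, r)) :
    pvSplit ('<' :: rest) = (('<' :: t ++ ['>']) :: (pvSplit r).1, (pvSplit r).2) := by
  rw [pvSplit]
  simp
  split <;> simp_all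

theorem pvSplit_cons (c : Char) (rest : List Char) (hc : c ≠ '<') :
    pvSplit (c :: rest) = ((pvSplit rest).1, c :: (pvSplit rest).2) := by
  rw [pvSplit]
  simp [hc]

theorem pvScanTag_eq_none_iff (xs : List Char) : pvScanTag xs = none ↔ '>' ∉ xs := by
  induction xs with
  | nil => simp [pvScanTag]
  | cons c rest ih =>
    simp only [pvScanTag]
    by_cases hc : c = '>'
    · simp [hc]
    · cases hs : pvScanTag rest with
      | none => simp [hc, Ne.symm hc, ← ih, hs]
      | some p => simp [hc, Ne.symm hc, ← ih, hs]

theorem pvIsImg_close (l : List Char) : pvIsImgMatch (l ++ ['>']) = pvIsImgTagA l := by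
  simp only [pvIsImgMatch, pvIsImgTagA]
  by_cases h : PySem.Chars.startswith (PySem.Chars.lower l) "<img ".toList = true
  · rw [h]
    rw [PySem.Chars.startswith_iff] at h ⊢
    simp [PySem.Chars.lower]
    exact h.trans (List.prefix_append _ _)
  · simp only [Bool.not_eq_true] at h
    rw [h]
    rw [← Bool.not_eq_true, PySem.Chars.startswith_iff]
    intro hp
    rw [← Bool.not_eq_true, PySem.Chars.startswith_iff] at h
    simp only [PySem.Chars.lower, List.map_append] at hp
    rcases List.prefix_concat_iff.mp hp with he | hpre
    · have : ('>' : Char) ∈ ("<img ".toList) := by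
        rw [he]; simp [PySem.Chars.lowerChar, PySem.Chars.isupper]
      simp at this
    · exact h hpre

theorem pvStrip_eq_nil_iff (l : List Char) :
    PySem.Chars.strip l = [] ↔ ∀ c ∈ l, PySem.Chars.isspace c := by
  simp only [PySem.Chars.strip, PySem.Chars.rstrip, PySem.Chars.lstrip]
  constructor
  · intro h c hc
    rw [List.reverse_eq_nil_iff, List.dropWhile_eq_nil_iff] at h
    cases hd : List.dropWhile PySem.Chars.isspace l with
    | nil =>
      rw [List.dropWhile_eq_nil_iff] at hd
      exact hd c hc
    | cons a tail =>
      have ha := List.head?_dropWhile_not PySem.Chars.isspace l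
      rw [hd] at ha
      simp at ha
      have : a ∈ (List.dropWhile PySem.Chars.isspace l).reverse := by simp [hd]
      exact absurd (h a this) (by simp [ha])
  · intro h
    have : List.dropWhile PySem.Chars.isspace l = [] :=
      List.dropWhile_eq_nil_iff.mpr h
    simp [this]

theorem pvLoopA_some (xs : List Char) : ∀ tag, pvLoopA xs (some tag) =
    (match pvScanTag xs with
     | none => true
     | some (t, r) => if pvIsImgTagA (tag ++ t) then false else pvLoopA r none) := by
  induction xs with
  | nil => intro tag; simp [pvLoopA, pvScanTag]
  | cons c rest ih =>
    intro tag
    simp only [pvLoopA, pvScanTag]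
    by_cases hc : c = '>'
    · simp [hc]
    · simp only [if_neg hc]
      rw [ih (tag ++ [c])]
      cases hs : pvScanTag rest with
      | none => simp
      | some p => simp

theorem pvMain : ∀ (n : Nat) (xs : List Char), xs.length ≤ n →
    pvLoopA xs none =
      (if (pvSplit xs).1.any pvIsImgMatch then false
       else (PySem.Chars.strip (pvDropUnclosed (pvSplit xs).2)).isEmpty) := by
  intro n
  induction n with
  | zero =>
    intro xs hx
    have : xs = [] := List.eq_nil_of_length_eq_zero (by omega)
    subst this
    simp [pvLoopA, pvSplit, pvDropUnclosed, PySem.Chars.strip, PySem.Chars.lstrip, PySem.Chars.rstrip]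
  | succ n ih =>
    intro xs hx
    cases xs with
    | nil => simp [pvLoopA, pvSplit, pvDropUnclosed, PySem.Chars.strip, PySem.Chars.lstrip, PySem.Chars.rstrip]
    | cons c rest =>
      by_cases hc : c = '<'
      · subst hc
        simp only [pvLoopA, reduceIte]
        rw [pvLoopA_some rest ['<']]
        cases hs : pvScanTag rest with
        | none =>
          have hgt : '>' ∉ rest := (pvScanTag_eq_none_iff rest).mp hs
          rw [pvSplit_lt_none rest hs]
          have hD : pvDropUnclosed ('<' :: rest) = [] := by
            rw [pvDropUnclosed]
            simp [hgt]
          simp [hD, PySem.Chars.strip, PySem.Chars.lstrip, PySem.Chars.rstrip]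
        | some p =>
          obtain ⟨t, r⟩ := p
          rw [pvSplit_lt_some rest t r hs]
          simp only [List.any_cons]
          rw [pvIsImg_close ('<' :: t)]
          by_cases him : pvIsImgTagA ('<' :: t) = true
          · simp [him]
          · simp only [Bool.not_eq_true] at him
            simp only [him, Bool.false_or, if_neg (by simp [him] : ¬ pvIsImgTagA ([('<' : Char)] ++ t) = true)]
            have hr : r.length ≤ n := by
              have := pvScanTag_length rest t r hs
              simp at hx
              omega
            exact ih r hr
      · rw [pvSplit_cons c rest hc]
        simp only [pvLoopA, if_neg hc]
        have hdrop : pvDropUnclosed (c :: (pvSplit rest).2) = c :: pvDropUnclosed (pvSplit rest).2 := by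
          rw [pvDropUnclosed]
          simp [hc]
        rw [hdrop]
        by_cases hsp : PySem.Chars.isspace c = true
        · have h1 : ¬ PySem.Chars.strip [c] ≠ [] := by
            simp [pvStrip_eq_nil_iff, hsp]
          rw [if_neg h1]
          have h2 : PySem.Chars.strip (c :: pvDropUnclosed (pvSplit rest).2)
              = PySem.Chars.strip (pvDropUnclosed (pvSplit rest).2) := by
            simp [PySem.Chars.strip, PySem.Chars.lstrip, List.dropWhile, hsp]
          rw [h2]
          exact ih rest (by simp at hx; omega)
        · have h1 : PySem.Chars.strip [c] ≠ [] := by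
            simp [pvStrip_eq_nil_iff, hsp]
          rw [if_pos h1]
          have h2 : PySem.Chars.strip (c :: pvDropUnclosed (pvSplit rest).2) ≠ [] := by
            intro h
            rw [pvStrip_eq_nil_iff] at h
            exact absurd (h c (by simp)) (by simp [hsp])
          cases hA : (pvSplit rest).1.any pvIsImgMatch <;> simp [h2]

-- ===== VERDICT (by name: the statement is the Claim_ definition above) =====
theorem is_empty_html_spec : Claim_equal_is_empty_html := by
  intro data _
  unfold Spec_is_empty_html is_empty_html is_empty_html_alt
  by_cases h : data.toList = []
  · simp [h]
  · simp only [if_neg h]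
    exact pvMain data.toList.length data.toList le_rfl
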